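-- pv_equiv track=rewrite | github.com/SynDNA-Lab/Primers_designer | offtarget.py | has_offtarget
-- ===== SOURCE A (Python) =====
-- def has_offtarget(l1):
--     if len(l1) < 2:
--         return False
--     fwd_facing = [int(l[3]) for l in l1 if l[1] == "+"]
--     rev_facing = [int(l[3]) for l in l1 if l[1] == "-"]
--     for rev in rev_facing:
--         for fwd in fwd_facing:
--             if (rev - fwd > 0) and (rev - fwd <= 10_000):
--                 return True # Offtarget w/ less then 10kb found
--     return False # No offtarget
-- ===== SOURCE B (Python) =====
-- def has_offtarget(l1):
--     if len(l1) < 2: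
--         return False
--     fwd = sorted(int(l[3]) for l in l1 if l[1] == "+")
--     for l in l1:
--         if l[1] == "-":
--             rev = int(l[3])
--             lo, hi = 0, len(fwd)
--             while lo < hi:  # leftmost index with fwd[i] >= rev - 10000
--                 mid = (lo + hi) // 2
--                 if fwd[mid] < rev - 10000:
--                     lo = mid + 1
--                 else:
--                     hi = mid
--             if lo < len(fwd) and fwd[lo] < rev:
--                 return True
--     return False
-- ===== Notes on version B (the rewrite author's own statement) =====
-- stated objective: alternative
-- what changed: Replaces the nested rev x fwd scan by sorting the fwd positions once and binary-searching the window [rev-10000, rev-1] for each rev primer; on typical inputs A's early exit makes the measured times comparable.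
import Mathlib
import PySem

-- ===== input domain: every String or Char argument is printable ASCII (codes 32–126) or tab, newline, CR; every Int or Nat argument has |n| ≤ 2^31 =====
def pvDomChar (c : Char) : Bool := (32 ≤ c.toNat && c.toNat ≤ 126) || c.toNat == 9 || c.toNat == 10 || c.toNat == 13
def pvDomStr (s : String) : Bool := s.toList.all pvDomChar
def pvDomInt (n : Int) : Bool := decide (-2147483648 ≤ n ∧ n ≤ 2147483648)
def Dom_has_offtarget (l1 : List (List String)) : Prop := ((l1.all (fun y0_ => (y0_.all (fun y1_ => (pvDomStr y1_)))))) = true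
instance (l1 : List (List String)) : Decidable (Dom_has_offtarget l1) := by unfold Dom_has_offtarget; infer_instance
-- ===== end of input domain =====

-- B sorts the fwd positions once and binary-searches the 10kb window for each rev primer,
-- replacing A's nested rev×fwd scan.

-- ===== PORT A =====
def has_offtarget (l1 : List (List String)) : Bool :=
  if l1.length < 2 then false
  else
    let fwd_facing := (l1.filter (fun l => PySem.List.pyGetD l 1 "" == "+")).map
        (fun l => (PySem.Int.ofStr? (PySem.List.pyGetD l 3 "")).getD 0)
    let rev_facing := (l1.filter (fun l => PySem.List.pyGetD l 1 "" == "-")).map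
        (fun l => (PySem.Int.ofStr? (PySem.List.pyGetD l 3 "")).getD 0)
    rev_facing.any (fun rev => fwd_facing.any (fun fwd =>
      decide (0 < rev - fwd) && decide (rev - fwd ≤ 10000)))

-- ===== PORT B =====
-- the while loop of Source B: leftmost index i in [lo, hi) with fwd[i] >= t
def pvLowerBound (fwd : List Int) (t : Int) (lo hi : Nat) : Nat :=
  if lo < hi then
    let mid := (lo + hi) / 2
    if PySem.List.pyGetD fwd (mid : Int) 0 < t then pvLowerBound fwd t (mid + 1) hi
    else pvLowerBound fwd t lo mid
  else lo
termination_by hi - lo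
decreasing_by all_goals omega

def has_offtarget_alt (l1 : List (List String)) : Bool :=
  if l1.length < 2 then false
  else
    let fwd := PySem.List.sorted ((l1.filter (fun l => PySem.List.pyGetD l 1 "" == "+")).map
        (fun l => (PySem.Int.ofStr? (PySem.List.pyGetD l 3 "")).getD 0)) (fun x => x) false
    l1.any (fun l =>
      if PySem.List.pyGetD l 1 "" == "-" then
        let rev := (PySem.Int.ofStr? (PySem.List.pyGetD l 3 "")).getD 0
        let lo := pvLowerBound fwd (rev - 10000) 0 fwd.length
        decide (lo < fwd.length) && decide (PySem.List.pyGetD fwd (lo : Int) 0 < rev)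
      else false)

-- ===== PRECONDITION & SPEC =====
-- Pre_: exactly where Python A returns normally — when len(l1) ≥ 2, every row must have an
-- element at index 1, and rows facing "+" or "-" must also have an int-parsable element at index 3.
def Pre_has_offtarget (l1 : List (List String)) : Prop :=
  l1.length < 2 ∨ ∀ l ∈ l1, 2 ≤ l.length ∧
    ((PySem.List.pyGetD l 1 "" = "+" ∨ PySem.List.pyGetD l 1 "" = "-") →
      4 ≤ l.length ∧ (PySem.Int.ofStr? (PySem.List.pyGetD l 3 "")).isSome)
instance (l1 : List (List String)) : Decidable (Pre_has_offtarget l1) := by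
  unfold Pre_has_offtarget; infer_instance

def pvWitness_has_offtarget : List (List String) :=
  [["a", "+", "c", "5"], ["b", "-", "c", "9000"]]

def Spec_has_offtarget (l1 : List (List String)) (out : Bool) : Prop := out = has_offtarget_alt l1
instance (l1 : List (List String)) (out : Bool) : Decidable (Spec_has_offtarget l1 out) := by
  unfold Spec_has_offtarget; infer_instance

-- ===== CLAIM (what is proved, stated in full; the proofs are below) =====
def Claim_equal_has_offtarget : Prop := ∀ (l1 : List (List String)), Dom_has_offtarget l1 → Pre_has_offtarget l1 → Spec_has_offtarget l1 (has_offtarget l1)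

-- ===== LEMMAS AND PROOFS =====

-- loop invariant of the binary search: on a sorted slice, pvLowerBound returns a point r ∈ [lo, hi]
-- with every element of [lo, r) below t and (when r < hi) the element at r at least t
theorem pvLowerBound_spec (s : List Int) (t : Int) (hsort : s.Pairwise (· ≤ ·)) :
    ∀ (n lo hi : Nat) (_ : hi - lo ≤ n) (_ : lo ≤ hi) (_ : hi ≤ s.length),
    lo ≤ pvLowerBound s t lo hi ∧ pvLowerBound s t lo hi ≤ hi ∧
    (∀ j, j < s.length → lo ≤ j → j < pvLowerBound s t lo hi → s.getD j 0 < t) ∧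
    (pvLowerBound s t lo hi < hi → t ≤ s.getD (pvLowerBound s t lo hi) 0) := by
  intro n
  induction n with
  | zero =>
    intro lo hi h1 h2 h3
    have hle : ¬ lo < hi := by omega
    rw [pvLowerBound.eq_def]; simp only [hle, if_false]
    exact ⟨le_refl _, h2, fun j _ hjlo hjr => by omega, fun hr => hr.elim⟩
  | succ n ih =>
    intro lo hi h1 h2 h3
    by_cases hlt : lo < hi
    · rw [pvLowerBound.eq_def]; simp only [hlt, if_true]
      have hmid1 : lo ≤ (lo + hi) / 2 := by omega
      have hmid2 : (lo + hi) / 2 < hi := by omega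
      have hmlen : (lo + hi) / 2 < s.length := by omega
      have hget : PySem.List.pyGetD s (((lo + hi) / 2 : Nat) : Int) 0 = s.getD ((lo + hi) / 2) 0 := by
        rw [PySem.List.pyGetD_natCast]
      by_cases hc : s.getD ((lo + hi) / 2) 0 < t
      · simp only [hget, hc, if_true]
        obtain ⟨a1, a2, a3, a4⟩ := ih ((lo + hi) / 2 + 1) hi (by omega) (by omega) h3
        refine ⟨by omega, a2, ?_, a4⟩
        intro j hj hjlo hjr
        by_cases hjm : (lo + hi) / 2 + 1 ≤ j
        · exact a3 j hj hjm hjr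
        · have hj2 : j ≤ (lo + hi) / 2 := by omega
          rcases eq_or_lt_of_le hj2 with h | h
          · rw [h]; exact hc
          · have hp := (List.pairwise_iff_getElem.mp hsort) j ((lo + hi) / 2) hj hmlen h
            rw [List.getD_eq_getElem s 0 hj]
            rw [List.getD_eq_getElem s 0 hmlen] at hc
            omega
      · simp only [hget, hc, if_false]
        obtain ⟨a1, a2, a3, a4⟩ := ih lo ((lo + hi) / 2) (by omega) (by omega) (by omega)
        refine ⟨a1, by omega, ?_, ?_⟩
        · intro j hj hjlo hjr; exact a3 j hj hjlo hjr
        · intro hr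
          by_cases hr2 : pvLowerBound s t lo ((lo + hi) / 2) < (lo + hi) / 2
          · exact a4 hr2
          · have he : pvLowerBound s t lo ((lo + hi) / 2) = (lo + hi) / 2 := by omega
            rw [he]; omega
    · rw [pvLowerBound.eq_def]; simp only [hlt, if_false]
      exact ⟨le_refl _, h2, fun j _ hjlo hjr => by omega, fun hr => hr.elim⟩

-- the binary-searched window test on sorted xs decides "∃ fwd ∈ xs with 0 < rev − fwd ≤ 10000"
theorem window_eq_any (xs s : List Int) (hs : s = PySem.List.sorted xs (fun x => x) false) (rev : Int) :
    (decide (pvLowerBound s (rev - 10000) 0 s.length < s.length) &&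
     decide (PySem.List.pyGetD s ((pvLowerBound s (rev - 10000) 0 s.length : Nat) : Int) 0 < rev)) =
    xs.any (fun f => decide (0 < rev - f) && decide (rev - f ≤ 10000)) := by
  have hsort : s.Pairwise (· ≤ ·) := by
    subst hs; exact PySem.List.sorted_pairwise xs (fun x => x)
  obtain ⟨a1, a2, a3, a4⟩ :=
    pvLowerBound_spec s (rev - 10000) hsort s.length 0 s.length (by omega) (by omega) (le_refl _)
  have hmemiff : ∀ v : Int, v ∈ s ↔ v ∈ xs := by
    intro v; rw [hs]
    exact PySem.List.mem_sorted xs (fun x => x) false v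
  apply Bool.eq_iff_iff.mpr
  simp only [Bool.and_eq_true, decide_eq_true_eq, List.any_eq_true, PySem.List.pyGetD_natCast]
  constructor
  · rintro ⟨hlt, hget⟩
    have hgd : s.getD (pvLowerBound s (rev - 10000) 0 s.length) 0 ∈ s := by
      rw [List.getD_eq_getElem s 0 hlt]; exact List.getElem_mem hlt
    have hge := a4 hlt
    exact ⟨_, (hmemiff _).mp hgd, by omega, by omega⟩
  · rintro ⟨f, hf, h1, h2⟩
    obtain ⟨j, hj, hje⟩ := List.mem_iff_getElem.mp ((hmemiff f).mpr hf)
    have hjd : s.getD j 0 = f := by rw [List.getD_eq_getElem s 0 hj]; exact hje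
    have hrj : pvLowerBound s (rev - 10000) 0 s.length ≤ j := by
      by_contra hc
      have := a3 j hj (by omega) (by omega)
      omega
    have hrlen : pvLowerBound s (rev - 10000) 0 s.length < s.length := by omega
    have hsrf : s.getD (pvLowerBound s (rev - 10000) 0 s.length) 0 ≤ s.getD j 0 := by
      rw [List.getD_eq_getElem s 0 hrlen, List.getD_eq_getElem s 0 hj]
      rcases eq_or_lt_of_le hrj with h | h
      · subst h; exact le_refl _
      · exact (List.pairwise_iff_getElem.mp hsort) _ j hrlen hj h
    exact ⟨hrlen, by omega⟩

theorem has_offtarget_eq (l1 : List (List String)) : has_offtarget l1 = has_offtarget_alt l1 := by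
  unfold has_offtarget has_offtarget_alt
  by_cases h : l1.length < 2
  · simp only [h, if_true]
  · simp only [h, if_false]
    rw [List.any_map, List.any_filter]
    apply PySem.List.any_congr_mem
    intro l _
    by_cases hp : PySem.List.pyGetD l 1 "" == "-"
    · simp only [hp, Function.comp, Bool.true_and, if_true]
      exact (window_eq_any _ _ rfl _).symm
    · simp [hp]

-- ===== VERDICT (by name: the statement is the Claim_ definition above) =====
theorem has_offtarget_spec : Claim_equal_has_offtarget := by
  intro l1 _ _
  unfold Spec_has_offtarget
  exact has_offtarget_eq l1
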